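-- pv_equiv track=rewrite | github.com/byungchul-chae/Exercise-Coding-Test | 프로그래머스/unrated/181932. 코드 처리하기/코드 처리하기.py | solution
-- ===== SOURCE A (Python) =====
-- def solution(code):
--     ret = ''
--     mode = 0
--     for idx, i in enumerate(code):
--         if(mode):
--             if(i=='1'):
--                 mode = 0
--             else:
--                 if(idx%2):
--                     ret = ret + i
--         else:
--             if(i=='1'):
--                 mode = 1
--             else:
--                 if(idx%2==0):
--                     ret = ret + i
--     if(len(ret)==0):
--         return 'EMPTY'
--     return ret
-- ===== SOURCE B (Python) =====
-- def solution(code):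
--     out = []
--     offset = 0
--     for k, seg in enumerate(code.split('1')):
--         for j, ch in enumerate(seg):
--             if (offset + j) % 2 == k % 2:
--                 out.append(ch)
--         offset += len(seg) + 1
--     return ''.join(out) if out else 'EMPTY'
-- ===== Notes on version B (the rewrite author's own statement) =====
-- stated objective: alternative
-- what changed: B splits the string on '1' and parity-filters each segment against a running global offset (segment index parity = mode), instead of A's character-by-character mode-toggling state machine.
import Mathlib
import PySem

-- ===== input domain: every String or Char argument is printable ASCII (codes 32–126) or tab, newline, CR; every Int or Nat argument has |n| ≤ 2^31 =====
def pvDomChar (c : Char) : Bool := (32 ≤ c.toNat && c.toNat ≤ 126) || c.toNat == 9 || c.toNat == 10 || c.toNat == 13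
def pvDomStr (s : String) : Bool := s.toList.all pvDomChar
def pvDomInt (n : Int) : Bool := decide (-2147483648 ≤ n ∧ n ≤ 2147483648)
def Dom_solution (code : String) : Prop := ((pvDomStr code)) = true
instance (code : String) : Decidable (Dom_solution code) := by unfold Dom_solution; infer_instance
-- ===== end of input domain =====

-- B re-implements A's mode-toggling scan as a split-on-'1' segment pass (alternative decomposition, same cost).

-- ===== PORT A =====
def solutionStep (st : List Char × Int) (p : Int × Char) : List Char × Int :=
  let ret := st.1; let mode := st.2
  let idx := p.1; let i := p.2
  if mode ≠ 0 then
    if i = '1' then (ret, 0)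
    else if PySem.Int.mod idx 2 ≠ 0 then (ret ++ [i], mode) else (ret, mode)
  else
    if i = '1' then (ret, 1)
    else if PySem.Int.mod idx 2 = 0 then (ret ++ [i], mode) else (ret, mode)

def solution (code : String) : String :=
  let r := (PySem.List.enumerate code.toList).foldl solutionStep ([], 0)
  if r.1.length = 0 then "EMPTY" else String.ofList r.1

-- ===== PORT B =====
def solutionAltInner (k : Int) (offset : Int) (out : List Char) (seg : List Char) : List Char :=
  (PySem.List.enumerate seg).foldl
    (fun out p => if PySem.Int.mod (offset + p.1) 2 = PySem.Int.mod k 2 then out ++ [p.2] else out)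
    out

def solution_alt (code : String) : String :=
  let segs := PySem.Chars.splitOn code.toList ['1']
  let r := (PySem.List.enumerate segs).foldl
    (fun st p => (solutionAltInner p.1 st.2 st.1 p.2, st.2 + (p.2.length : Int) + 1))
    (([] : List Char), (0 : Int))
  if r.1 = [] then "EMPTY" else String.ofList r.1

-- ===== PRECONDITION & SPEC =====
def Spec_solution (code : String) (out : String) : Prop := out = solution_alt code
instance (code : String) (out : String) : Decidable (Spec_solution code out) := by unfold Spec_solution; infer_instance

-- ===== CLAIM (what is proved, stated in full; the proofs are below) =====
def Claim_equal_solution : Prop := ∀ (code : String), Dom_solution code → Spec_solution code (solution code)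

-- ===== LEMMAS AND PROOFS =====

/-- Reference: the characters A keeps, scanning from index `s` in mode `m`. -/
def keep : List Char → Int → Int → List Char
  | [], _, _ => []
  | c :: r, s, m =>
    if c = '1' then keep r (s + 1) (1 - m)
    else (if s % 2 = m then [c] else []) ++ keep r (s + 1) m

/-- Structural split on '1'. -/
def simpleSplit : List Char → List (List Char)
  | [] => [[]]
  | c :: r =>
    if c = '1' then [] :: simpleSplit r
    else
      match simpleSplit r with
      | [] => [[c]]
      | x :: xs => (c :: x) :: xs

def joinSegs : List (List Char) → List Char
  | [] => []
  | [x] => x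
  | x :: xs => x ++ '1' :: joinSegs xs

theorem simpleSplit_ne_nil (l : List Char) : simpleSplit l ≠ [] := by
  cases l with
  | nil => simp [simpleSplit]
  | cons c r =>
    simp only [simpleSplit]
    split
    · simp
    · split <;> simp

theorem join_simpleSplit (l : List Char) : joinSegs (simpleSplit l) = l := by
  induction l with
  | nil => rfl
  | cons c r ih =>
    by_cases h : c = '1'
    · subst h
      simp only [simpleSplit, reduceIte]
      rcases hs : simpleSplit r with _ | ⟨x, xs⟩
      · exact absurd hs (simpleSplit_ne_nil r)
      · rw [hs] at ih
        simp [joinSegs, ih]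
    · simp only [simpleSplit, if_neg h]
      rcases hs : simpleSplit r with _ | ⟨x, xs⟩
      · exact absurd hs (simpleSplit_ne_nil r)
      · rw [hs] at ih
        cases xs with
        | nil => simpa [joinSegs] using congrArg (c :: ·) ih
        | cons y ys => simpa [joinSegs] using congrArg (c :: ·) ih

theorem one_notMem_simpleSplit (l : List Char) :
    ∀ seg ∈ simpleSplit l, '1' ∉ seg := by
  induction l with
  | nil => simp [simpleSplit]
  | cons c r ih =>
    by_cases h : c = '1'
    · subst h
      intro seg hseg
      simp only [simpleSplit, if_true, List.mem_cons] at hseg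
      rcases hseg with rfl | hseg
      · simp
      · exact ih seg hseg
    · simp only [simpleSplit, if_neg h]
      rcases hs : simpleSplit r with _ | ⟨x, xs⟩
      · exact absurd hs (simpleSplit_ne_nil r)
      · rw [hs] at ih
        intro seg hseg
        rw [List.mem_cons] at hseg
        rcases hseg with rfl | hseg
        · intro hmem
          rw [List.mem_cons] at hmem
          rcases hmem with hmem | hmem
          · exact h hmem.symm
          · exact ih x (by simp) hmem
        · exact ih seg (by simp [hseg])

theorem splitOn_go_eq (f : Nat) : ∀ (l cur : List Char) (acc : List (List Char)),
    l.length ≤ f →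
    PySem.Chars.splitOn.go ['1'] f l cur acc =
      acc.reverse ++
        (match simpleSplit l with
         | [] => []
         | x :: xs => (cur.reverse ++ x) :: xs) := by
  induction f with
  | zero =>
    intro l cur acc hl
    have : l = [] := by
      cases l with
      | nil => rfl
      | cons a b => simp at hl
    subst this
    simp [PySem.Chars.splitOn.go, simpleSplit]
  | succ f ihf =>
    intro l cur acc hl
    cases l with
    | nil => simp [PySem.Chars.splitOn.go, simpleSplit]
    | cons c rest =>
      by_cases h : c = '1'
      · subst h
        have hpre : List.isPrefixOf ['1'] ('1' :: rest) = true := by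
          simp [List.isPrefixOf]
        simp only [PySem.Chars.splitOn.go, hpre, if_true, List.length_singleton,
          List.drop_succ_cons, List.drop_zero]
        rw [ihf rest [] (cur.reverse :: acc) (by simpa using Nat.lt_succ_iff.mp (by simpa using hl))]
        rcases hs : simpleSplit rest with _ | ⟨x, xs⟩
        · exact absurd hs (simpleSplit_ne_nil rest)
        · simp [simpleSplit, hs]
      · have hpre : List.isPrefixOf ['1'] (c :: rest) = false := by
          simpa [List.isPrefixOf] using fun hc => h hc.symm
        simp only [PySem.Chars.splitOn.go, hpre]
        rw [if_neg (by simp)]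
        rw [ihf rest (c :: cur) acc (by simpa using Nat.lt_succ_iff.mp (by simpa using hl))]
        rcases hs : simpleSplit rest with _ | ⟨x, xs⟩
        · exact absurd hs (simpleSplit_ne_nil rest)
        · simp [simpleSplit, if_neg h, hs]

theorem splitOn_eq_simpleSplit (l : List Char) :
    PySem.Chars.splitOn l ['1'] = simpleSplit l := by
  unfold PySem.Chars.splitOn
  rw [splitOn_go_eq (l.length + 1) l [] [] (by omega)]
  rcases hs : simpleSplit l with _ | ⟨x, xs⟩
  · exact absurd hs (simpleSplit_ne_nil l)
  · simp

theorem keep_append (a b : List Char) (s m : Int) (h : '1' ∉ a) :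
    keep (a ++ b) s m = keep a s m ++ keep b (s + a.length) m := by
  induction a generalizing s with
  | nil => simp [keep]
  | cons c r ih =>
    have hc : c ≠ '1' := fun hc => h (by simp [hc])
    have hr : '1' ∉ r := fun hr => h (by simp [hr])
    simp only [List.cons_append, keep, if_neg hc]
    rw [ih (s + 1) hr]
    simp only [List.length_cons]
    have : s + 1 + (r.length : Int) = s + ((r.length : Int) + 1) := by ring
    rw [this]
    push_cast
    split <;> simp

theorem foldA_eq_keep (l : List Char) (s m : Int) (ret : List Char)
    (hs : 0 ≤ s) (hm : m = 0 ∨ m = 1) :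
    ((PySem.List.enumerate l s).foldl solutionStep (ret, m)).1 = ret ++ keep l s m := by
  induction l generalizing s m ret with
  | nil => simp [keep, PySem.List.enumerate]
  | cons c r ih =>
    rw [PySem.List.enumerate_cons, List.foldl_cons]
    have hmod : PySem.Int.mod s 2 = s % 2 := PySem.Int.mod_eq_emod_of_pos (by omega)
    have h2 : s % 2 = 0 ∨ s % 2 = 1 := Int.emod_two_eq s
    rcases hm with hm | hm <;> subst hm
    · by_cases hc : c = '1'
      · subst hc
        simp only [solutionStep, keep, reduceIte]
        rw [show ((1:Int) - 0) = 1 by ring]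
        simpa using ih (s + 1) 1 ret (by omega) (Or.inr rfl)
      · simp only [solutionStep, keep, if_neg hc, hmod]
        rw [if_neg (by simp)]
        by_cases he : s % 2 = 0
        · rw [if_pos he, if_pos (by omega : s % 2 = (0:Int))]
          rw [ih (s + 1) 0 (ret ++ [c]) (by omega) (Or.inl rfl)]
          simp
        · rw [if_neg he, if_neg (by omega : ¬ s % 2 = (0:Int))]
          rw [ih (s + 1) 0 ret (by omega) (Or.inl rfl)]
          simp
    · by_cases hc : c = '1'
      · subst hc
        simp only [solutionStep, keep, reduceIte]
        rw [if_pos (by simp)]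
        rw [show ((1:Int) - 1) = 0 by ring]
        simpa using ih (s + 1) 0 ret (by omega) (Or.inl rfl)
      · simp only [solutionStep, keep, if_neg hc, hmod]
        rw [if_pos (by simp)]
        by_cases he : s % 2 = 1
        · rw [if_pos (by omega : ¬ s % 2 = (0:Int)), if_pos (by omega : s % 2 = (1:Int))]
          rw [ih (s + 1) 1 (ret ++ [c]) (by omega) (Or.inr rfl)]
          simp
        · rw [if_neg (by omega : ¬ ¬ s % 2 = (0:Int)), if_neg (by omega : ¬ s % 2 = (1:Int))]
          rw [ih (s + 1) 1 ret (by omega) (Or.inr rfl)]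
          simp

theorem inner_eq_keep (seg : List Char) (j0 s k : Int) (out : List Char)
    (hs : 0 ≤ s + j0) (h1 : '1' ∉ seg) :
    (PySem.List.enumerate seg j0).foldl
      (fun out p => if PySem.Int.mod (s + p.1) 2 = PySem.Int.mod k 2 then out ++ [p.2] else out)
      out = out ++ keep seg (s + j0) (k % 2) := by
  induction seg generalizing j0 out with
  | nil => simp [keep, PySem.List.enumerate]
  | cons c r ih =>
    have hc : c ≠ '1' := fun hc => h1 (by simp [hc])
    have hr : '1' ∉ r := fun hr => h1 (by simp [hr])
    rw [PySem.List.enumerate_cons]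
    simp only [List.foldl_cons]
    have hmod1 : PySem.Int.mod (s + j0) 2 = (s + j0) % 2 := PySem.Int.mod_eq_emod_of_pos (by omega)
    have hmod2 : PySem.Int.mod k 2 = k % 2 := PySem.Int.mod_eq_emod_of_pos (by omega)
    have hstep : s + (j0 + 1) = s + j0 + 1 := by ring
    by_cases he : PySem.Int.mod (s + j0) 2 = PySem.Int.mod k 2
    · rw [if_pos he, ih (j0 + 1) (out ++ [c]) (by omega) hr, hstep]
      have he2 : (s + j0) % 2 = k % 2 := by rw [← hmod1, ← hmod2]; exact he
      simp [keep, if_neg hc, if_pos he2]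
    · rw [if_neg he, ih (j0 + 1) out (by omega) hr, hstep]
      have he2 : ¬ (s + j0) % 2 = k % 2 := by rw [← hmod1, ← hmod2]; exact he
      simp [keep, if_neg hc, if_neg he2]

theorem outer_eq_keep (segs : List (List Char)) (k0 : Nat) (s : Int) (out : List Char)
    (hs : 0 ≤ s) (h1 : ∀ seg ∈ segs, '1' ∉ seg) :
    ((PySem.List.enumerate segs (k0 : Int)).foldl
      (fun st p => (solutionAltInner p.1 st.2 st.1 p.2, st.2 + (p.2.length : Int) + 1))
      (out, s)).1 = out ++ keep (joinSegs segs) s ((k0 : Int) % 2) := by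
  induction segs generalizing k0 s out with
  | nil => simp [joinSegs, keep, PySem.List.enumerate]
  | cons seg rest ih =>
    rw [PySem.List.enumerate_cons, List.foldl_cons]
    have hseg : '1' ∉ seg := h1 seg (by simp)
    have hrest : ∀ t ∈ rest, '1' ∉ t := fun t ht => h1 t (by simp [ht])
    have hinner : solutionAltInner (k0 : Int) s out seg = out ++ keep seg (s + 0) ((k0 : Int) % 2) := by
      unfold solutionAltInner
      exact inner_eq_keep seg 0 s (k0 : Int) out (by omega) hseg
    simp only [hinner]
    have hcast : ((k0 : Int) + 1) = ((k0 + 1 : Nat) : Int) := by push_cast; ring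
    rw [hcast, ih (k0 + 1) (s + (seg.length : Int) + 1) _ (by positivity) hrest]
    have hpar : ((k0 + 1 : Nat) : Int) % 2 = 1 - (k0 : Int) % 2 := by omega
    rw [hpar]
    cases rest with
    | nil => simp [joinSegs, keep]
    | cons y ys =>
      have : joinSegs (seg :: y :: ys) = seg ++ '1' :: joinSegs (y :: ys) := by
        simp [joinSegs]
      rw [this, keep_append seg ('1' :: joinSegs (y :: ys)) s ((k0 : Int) % 2) hseg]
      simp only [keep, reduceIte]
      simp [List.append_assoc, add_assoc]

theorem solution_spec : Claim_equal_solution := by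
  intro code _
  unfold Spec_solution solution solution_alt
  simp only [splitOn_eq_simpleSplit]
  have hA := foldA_eq_keep code.toList 0 0 [] le_rfl (Or.inl rfl)
  have hB := outer_eq_keep (simpleSplit code.toList) 0 0 [] le_rfl
    (one_notMem_simpleSplit code.toList)
  rw [join_simpleSplit] at hB
  norm_num at hA hB
  rw [hA, hB]
  simp [List.length_eq_zero_iff]
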